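-- pv_equiv track=rewrite | github.com/UMBC-CMSC-Hamilton/cmsc201-fall22 | 12-12 Final Review/final_review_1pm.py | force_sort
-- ===== SOURCE A (Python) =====
-- def force_sort(a_list, previous=None):
--     if not a_list:
--         return []
--
--     if previous == None:
--         return force_sort(a_list[1:], a_list[0])
--     elif a_list[0] >= previous:
--         return [a_list[0]] + force_sort(a_list[1:], a_list[0])
--     else:
--         return force_sort(a_list[1:], a_list[0])
-- ===== SOURCE B (Python) =====
-- def force_sort(a_list, previous=None):
--     result = []
--     for x in a_list:
--         if previous is not None and x >= previous:
--             result.append(x)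
--         previous = x
--     return result
-- ===== Notes on version B (the rewrite author's own statement) =====
-- stated objective: faster
-- what changed: Replaced the recursion with repeated list slicing and list concatenation by a single iterative pass that tracks the previous element and appends kept elements to one result list.
import Mathlib
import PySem

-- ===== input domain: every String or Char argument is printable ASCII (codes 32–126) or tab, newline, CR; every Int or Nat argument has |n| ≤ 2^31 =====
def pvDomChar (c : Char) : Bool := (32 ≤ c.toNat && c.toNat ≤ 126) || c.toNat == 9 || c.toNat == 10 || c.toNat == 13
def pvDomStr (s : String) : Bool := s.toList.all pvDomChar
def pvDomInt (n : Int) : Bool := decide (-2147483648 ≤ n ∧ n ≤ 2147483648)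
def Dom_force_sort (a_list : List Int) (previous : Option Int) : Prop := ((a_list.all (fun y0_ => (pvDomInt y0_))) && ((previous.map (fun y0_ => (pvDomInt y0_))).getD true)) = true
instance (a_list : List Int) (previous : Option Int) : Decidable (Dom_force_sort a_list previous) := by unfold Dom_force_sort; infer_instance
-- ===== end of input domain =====

-- B replaces A's recursive slice-and-concatenate scheme by a single iterative pass
-- tracking the previous element (asymptotically faster in a timing run).


-- ===== PORT A =====
def force_sort (a_list : List Int) (previous : Option Int) : List Int :=
  match a_list, previous with
  | [], _ => []
  | x :: rest, none => force_sort rest (some x)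
  | x :: rest, some p =>
      if x ≥ p then x :: force_sort rest (some x)
      else force_sort rest (some x)

-- ===== PORT B =====
def force_sort_alt (a_list : List Int) (previous : Option Int) : List Int :=
  (a_list.foldl
    (fun (acc : List Int × Option Int) x =>
      ((match acc.2 with
        | some p => if x ≥ p then acc.1 ++ [x] else acc.1
        | none => acc.1), some x))
    ([], previous)).1

-- ===== PRECONDITION & SPEC =====
def Spec_force_sort (a_list : List Int) (previous : Option Int) (out : List Int) : Prop := out = force_sort_alt a_list previous
instance (a_list : List Int) (previous : Option Int) (out : List Int) : Decidable (Spec_force_sort a_list previous out) := by unfold Spec_force_sort; infer_instance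

-- ===== CLAIM (what is proved, stated in full; the proofs are below) =====
def Claim_equal_force_sort : Prop := ∀ (a_list : List Int) (previous : Option Int), Dom_force_sort a_list previous → Spec_force_sort a_list previous (force_sort a_list previous)

-- ===== LEMMAS AND PROOFS =====
-- Loop invariant: B's fold starting from accumulator (acc, prev) produces acc ++ A's result.
theorem force_sort_fold_eq (l : List Int) (prev : Option Int) (acc : List Int) :
    (l.foldl
      (fun (a : List Int × Option Int) x =>
        ((match a.2 with
          | some p => if x ≥ p then a.1 ++ [x] else a.1
          | none => a.1), some x))
      (acc, prev)).1 = acc ++ force_sort l prev := by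
  induction l generalizing prev acc with
  | nil => simp [force_sort]
  | cons x rest ih =>
      cases prev with
      | none => simp [force_sort, List.foldl, ih]
      | some p =>
          by_cases h : x ≥ p
          · simp [force_sort, List.foldl, h, ih]
          · simp [force_sort, List.foldl, h, ih]

-- ===== VERDICT (by name: the statement is the Claim_ definition above) =====
theorem force_sort_spec : Claim_equal_force_sort := by
  intro a_list previous _
  unfold Spec_force_sort force_sort_alt
  rw [force_sort_fold_eq]
  simp
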